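-- pv_equiv track=rewrite | github.com/millie120701/Poker-game | Poker/EvalutationPokerNew.py | order_poker_hand
-- ===== SOURCE A (Python) =====
-- def order_poker_hand(hand):
--   counts = {}
--   for card in hand:
--     rank = card[0]
--     if rank in counts:
--       counts[rank] += 1
--     else:
--       counts[rank] = 1
--   ordered_hand = []
--   for rank in sorted(counts, key=lambda x: (-counts[x], x)):
--     for i in range(counts[rank]):
--       for card in hand:
--         if card[0] == rank:
--           ordered_hand.append(card)
--           hand.remove(card)
--           break
--   return ordered_hand
-- ===== SOURCE B (Python) =====
-- def order_poker_hand(hand):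
--   groups = {}
--   for card in hand:
--     groups.setdefault(card[0], []).append(card)
--   ordered_hand = []
--   for rank in sorted(groups, key=lambda r: (-len(groups[r]), r)):
--     ordered_hand.extend(groups[rank])
--   return ordered_hand
-- ===== Notes on version B (the rewrite author's own statement) =====
-- stated objective: faster
-- what changed: B groups the cards into per-rank lists in one dict pass and concatenates the groups over the frequency-sorted ranks, instead of A's per-card rescans of the hand with repeated list.remove; note A empties the hand list in place while B leaves it untouched (equivalence is about the return value).
import Mathlib
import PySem

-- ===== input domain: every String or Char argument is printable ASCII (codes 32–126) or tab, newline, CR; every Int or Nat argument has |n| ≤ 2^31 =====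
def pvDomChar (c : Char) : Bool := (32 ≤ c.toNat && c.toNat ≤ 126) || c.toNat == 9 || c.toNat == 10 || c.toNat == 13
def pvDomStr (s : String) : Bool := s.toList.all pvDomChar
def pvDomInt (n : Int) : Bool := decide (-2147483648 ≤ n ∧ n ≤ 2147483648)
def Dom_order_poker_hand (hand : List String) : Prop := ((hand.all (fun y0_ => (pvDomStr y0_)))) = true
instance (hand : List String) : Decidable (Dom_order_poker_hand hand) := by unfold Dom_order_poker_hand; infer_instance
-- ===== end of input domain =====

-- B builds per-rank groups in one pass and concatenates them over the frequency-sorted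
-- ranks (faster: no repeated rescans/removals). Python A empties the argument list in
-- place, B does not mutate it: the equivalence proved here is about the RETURN value.

-- ===== PORT A =====
-- card[0] of a nonempty card string (Pre_ excludes "" where Python raises IndexError)
def pvRank (c : String) : Char := c.toList.headD ' '

-- the inner 'for card in hand: if card[0]==rank: append; hand.remove(card); break'
def pvExtract (rank : Char) : List String → Option (String × List String)
  | [] => none
  | c :: rest =>
    if pvRank c = rank then some (c, rest)
    else
      match pvExtract rank rest with
      | none => none
      | some (x, r) => some (x, c :: r)

-- 'for i in range(counts[rank]): …' acting on (ordered_hand, hand)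
def pvRepeatA (rank : Char) : Nat → List String → List String → List String × List String
  | 0, h, acc => (acc, h)
  | Nat.succ m, h, acc =>
    match pvExtract rank h with
    | none => pvRepeatA rank m h acc
    | some (c, rest) => pvRepeatA rank m rest (acc ++ [c])

def order_poker_hand (hand : List String) : List String :=
  let counts : PySem.Dict Char Int :=
    hand.foldl (fun d card =>
      let rank := pvRank card
      if d.contains rank then d.insert rank (d.getD rank 0 + 1)
      else d.insert rank 1) PySem.Dict.empty
  let ranks := PySem.List.sorted2 counts.keys (fun x => -(counts.getD x 0)) (fun x => x)
  (ranks.foldl (fun s rank => pvRepeatA rank (counts.getD rank 0).toNat s.2 s.1)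
    (([] : List String), hand)).1

-- ===== PORT B =====
def order_poker_hand_alt (hand : List String) : List String :=
  let groups : PySem.Dict Char (List String) :=
    hand.foldl (fun d card => d.modify (pvRank card) [] (fun g => g ++ [card]))
      PySem.Dict.empty
  let ranks := PySem.List.sorted2 groups.keys
      (fun r => -(Int.ofNat (groups.getD r []).length)) (fun r => r)
  ranks.foldl (fun acc r => acc ++ groups.getD r []) []

-- ===== PRECONDITION & SPEC =====
-- Pre_ excludes hands containing the empty string, on which Python A (and B) raises IndexError at card[0].
def Pre_order_poker_hand (hand : List String) : Prop := ∀ c ∈ hand, c ≠ ""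
instance (hand : List String) : Decidable (Pre_order_poker_hand hand) := by
  unfold Pre_order_poker_hand; infer_instance
def pvWitness_order_poker_hand : List String := ["2H", "2D", "5S"]

def Spec_order_poker_hand (hand : List String) (out : List String) : Prop := out = order_poker_hand_alt hand
instance (hand : List String) (out : List String) : Decidable (Spec_order_poker_hand hand out) := by unfold Spec_order_poker_hand; infer_instance

-- ===== CLAIM (what is proved, stated in full; the proofs are below) =====
def Claim_equal_order_poker_hand : Prop := ∀ (hand : List String), Dom_order_poker_hand hand → Pre_order_poker_hand hand → Spec_order_poker_hand hand (order_poker_hand hand)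

-- ===== LEMMAS AND PROOFS =====

-- the rank predicate both sides filter by
def pb (r : Char) (c : String) : Bool := pvRank c == r

theorem extract_cases (r : Char) : ∀ h : List String,
    (pvExtract r h = none ∧ h.filter (pb r) = []) ∨
    (∃ c rest, pvExtract r h = some (c, rest) ∧
      h.filter (pb r) = c :: rest.filter (pb r) ∧
      h.filter (fun x => !(pb r x)) = rest.filter (fun x => !(pb r x))) := by
  intro h
  induction h with
  | nil => left; simp [pvExtract]
  | cons c t ih =>
    by_cases hc : pvRank c = r
    · right
      exact ⟨c, t, by simp [pvExtract, hc], by simp [pb, hc], by simp [pb, hc]⟩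
    · rcases ih with ⟨hnone, hfil⟩ | ⟨x, rr, hsome, hf1, hf2⟩
      · left
        constructor
        · simp [pvExtract, hc, hnone]
        · simp [pb, hc, hfil]
      · right
        refine ⟨x, c :: rr, ?_, ?_, ?_⟩
        · simp [pvExtract, hc, hsome]
        · simpa [pb, hc] using hf1
        · simpa [pb, hc] using hf2

theorem repeat_spec (r : Char) : ∀ (n : Nat) (h acc : List String),
    (h.filter (pb r)).length = n →
    pvRepeatA r n h acc = (acc ++ h.filter (pb r), h.filter (fun x => !(pb r x))) := by
  intro n
  induction n with
  | zero =>
    intro h acc hl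
    have hnil : h.filter (pb r) = [] := List.eq_nil_of_length_eq_zero hl
    have hself : h.filter (fun x => !(pb r x)) = h := by
      apply List.filter_eq_self.mpr
      intro a ha
      have : ¬ (pb r a = true) := by
        intro hp
        have : a ∈ h.filter (pb r) := List.mem_filter.mpr ⟨ha, hp⟩
        simp [hnil] at this
      simp [this]
    simp [pvRepeatA, hnil, hself]
  | succ m ih =>
    intro h acc hl
    rcases extract_cases r h with ⟨hnone, hfil⟩ | ⟨c, rest, hsome, hf1, hf2⟩
    · rw [hfil] at hl; simp at hl
    · have hlen : (rest.filter (pb r)).length = m := by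
        rw [hf1] at hl; simpa using hl
      simp only [pvRepeatA, hsome]
      rw [ih rest (acc ++ [c]) hlen, hf1, hf2]
      simp

theorem foldA (H : List String) : ∀ (rs : List Char), rs.Nodup →
    ∀ (acc h : List String), (∀ r ∈ rs, h.filter (pb r) = H.filter (pb r)) →
    (rs.foldl (fun s r => pvRepeatA r (H.filter (pb r)).length s.2 s.1) (acc, h)).1
      = acc ++ rs.flatMap (fun r => H.filter (pb r)) := by
  intro rs
  induction rs with
  | nil => intro _ acc h _; simp
  | cons r rs' ih =>
    intro hnd acc h hfil
    have hr : h.filter (pb r) = H.filter (pb r) := hfil r (by simp)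
    have hstep : pvRepeatA r (H.filter (pb r)).length h acc
        = (acc ++ H.filter (pb r), h.filter (fun x => !(pb r x))) := by
      rw [← hr]; exact repeat_spec r _ h acc rfl
    have hnd' : rs'.Nodup := (List.nodup_cons.mp hnd).2
    have hnotmem : r ∉ rs' := (List.nodup_cons.mp hnd).1
    have hfil' : ∀ r' ∈ rs',
        (h.filter (fun x => !(pb r x))).filter (pb r') = H.filter (pb r') := by
      intro r' hr'
      have hne : r' ≠ r := fun he => hnotmem (he ▸ hr')
      rw [List.filter_filter]
      have : ∀ a : String, (pb r' a && !(pb r a)) = pb r' a := by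
        intro a
        by_cases hp : pb r' a = true
        · have : pvRank a = r' := by simpa [pb] using hp
          have : pb r a = false := by simp [pb, this, hne]
          simp [hp, this]
        · simp [Bool.eq_false_iff.mpr hp]
      rw [show (fun a => pb r' a && !(pb r a)) = pb r' from funext this]
      exact hfil r' (by simp [hr'])
    calc (List.foldl (fun s r => pvRepeatA r (H.filter (pb r)).length s.2 s.1)
            (acc, h) (r :: rs')).1
        = (List.foldl (fun s r => pvRepeatA r (H.filter (pb r)).length s.2 s.1)
            (acc ++ H.filter (pb r), h.filter (fun x => !(pb r x))) rs').1 := by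
          simp only [List.foldl_cons, hstep]
      _ = acc ++ H.filter (pb r) ++ rs'.flatMap (fun r => H.filter (pb r)) :=
          ih hnd' _ _ hfil'
      _ = acc ++ (r :: rs').flatMap (fun r => H.filter (pb r)) := by simp

-- counts dict: the branch is one insert with value getD+1
theorem cstep_eq (d : PySem.Dict Char Int) (card : String) :
    (if d.contains (pvRank card) then d.insert (pvRank card) (d.getD (pvRank card) 0 + 1)
     else d.insert (pvRank card) 1)
    = d.insert (pvRank card) (d.getD (pvRank card) 0 + 1) := by
  by_cases hc : d.contains (pvRank card) = true
  · simp [hc]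
  · have hc' : d.contains (pvRank card) = false := by simpa using hc
    rw [if_neg (by simp [hc']), PySem.Dict.getD_of_not_contains d 0 hc']
    norm_num

theorem counts_eq (hand : List String) :
    hand.foldl (fun d card =>
      if d.contains (pvRank card) then d.insert (pvRank card) (d.getD (pvRank card) 0 + 1)
      else d.insert (pvRank card) 1) (PySem.Dict.empty : PySem.Dict Char Int)
    = (hand.map pvRank).foldl (fun d x => d.insert x (d.getD x 0 + 1)) PySem.Dict.empty := by
  rw [List.foldl_map]
  exact PySem.List.foldl_congr_mem hand _ _ _ (fun d card _ => cstep_eq d card)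

theorem counts_getD (hand : List String) (r : Char) :
    ((hand.map pvRank).foldl (fun d x => d.insert x (d.getD x 0 + 1))
      PySem.Dict.empty).getD r 0 = ((hand.map pvRank).count r : Int) := by
  rw [PySem.Dict.getD_foldl_insert_add_one]
  simp

theorem groups_getD (hand : List String) (r : Char) :
    (hand.foldl (fun d card => d.modify (pvRank card) [] (fun g => g ++ [card]))
      PySem.Dict.empty).getD r [] = hand.filter (pb r) := by
  have h1 : hand.foldl (fun d card => d.modify (pvRank card) [] (fun g => g ++ [card]))
        PySem.Dict.empty
      = (hand.map (fun c => (pvRank c, c))).foldl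
          (fun d p => d.modify p.1 [] (fun g => g ++ [p.2])) PySem.Dict.empty := by
    rw [List.foldl_map]
  rw [h1, PySem.Dict.getD_foldl_modify_append]
  simp only [PySem.Dict.getD_empty, List.nil_append, List.filter_map, Function.comp_def,
    List.map_map]
  unfold pb
  simp

theorem count_eq_length_filter (hand : List String) (r : Char) :
    (hand.map pvRank).count r = (hand.filter (pb r)).length := by
  rw [List.count_eq_countP, List.countP_map, List.countP_eq_length_filter]
  rfl

-- ===== VERDICT (by name: the statement is the Claim_ definition above) =====
theorem order_poker_hand_spec : Claim_equal_order_poker_hand := by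
  intro hand _ _
  unfold Spec_order_poker_hand
  simp only [order_poker_hand, order_poker_hand_alt]
  rw [counts_eq hand]
  set cnts : PySem.Dict Char Int :=
    (hand.map pvRank).foldl (fun d x => d.insert x (d.getD x 0 + 1)) PySem.Dict.empty
    with hcnts
  set grps : PySem.Dict Char (List String) :=
    hand.foldl (fun d card => d.modify (pvRank card) [] (fun g => g ++ [card]))
      PySem.Dict.empty with hgrps
  have hkeys : cnts.keys = grps.keys := by
    rw [hcnts, hgrps, PySem.Dict.keys_foldl_insert,
      PySem.Dict.keys_foldl_modify_key hand pvRank [] (fun d card g => g ++ [card])]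
    simp [PySem.Dict.keys_empty]
  have hval : ∀ r, cnts.getD r 0 = ((hand.filter (pb r)).length : Int) := by
    intro r
    rw [hcnts, counts_getD, count_eq_length_filter]
  have hgval : ∀ r, grps.getD r [] = hand.filter (pb r) := fun r => groups_getD hand r
  have hk1 : (fun x => -(cnts.getD x 0))
      = (fun r => -(Int.ofNat ((grps.getD r []).length))) := by
    funext r
    rw [hval r, hgval r]
    rfl
  have hranks : PySem.List.sorted2 cnts.keys (fun x => -(cnts.getD x 0)) (fun x => x)
      = PySem.List.sorted2 grps.keys
          (fun r => -(Int.ofNat ((grps.getD r []).length))) (fun r => r) := by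
    rw [hkeys, hk1]
  rw [hranks]
  set ranks := PySem.List.sorted2 grps.keys
      (fun r => -(Int.ofNat ((grps.getD r []).length))) (fun r => r) with hranksdef
  have hnd : ranks.Nodup := by
    have hperm : ranks.Perm grps.keys := PySem.List.sorted2_perm _ _ _ _
    have hgnd : grps.keys.Nodup := by
      rw [hgrps]
      exact PySem.Dict.nodup_keys_foldl_modify_key hand pvRank []
        (fun d card g => g ++ [card]) PySem.Dict.empty
        (by simp [PySem.Dict.keys_empty])
    exact hperm.symm.nodup hgnd
  have hA : (ranks.foldl (fun s rank => pvRepeatA rank (cnts.getD rank 0).toNat s.2 s.1)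
        (([] : List String), hand)).1
      = ranks.flatMap (fun r => hand.filter (pb r)) := by
    have hcongr : ranks.foldl
          (fun s rank => pvRepeatA rank (cnts.getD rank 0).toNat s.2 s.1)
          (([] : List String), hand)
        = ranks.foldl (fun s r => pvRepeatA r ((hand.filter (pb r)).length) s.2 s.1)
          (([] : List String), hand) := by
      apply PySem.List.foldl_congr_mem
      intro s r _
      rw [hval r]
      simp
    rw [hcongr]
    simpa using foldA hand ranks hnd [] hand (fun r _ => rfl)
  have hB : ranks.foldl (fun acc r => acc ++ grps.getD r []) []
      = ranks.flatMap (fun r => hand.filter (pb r)) := by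
    rw [PySem.List.foldl_append_eq_flatMap]
    simp only [List.nil_append]
    apply List.flatMap_congr
    intro r _
    exact hgval r
  rw [hA, hB]
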